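-- pv_equiv track=rewrite | github.com/dev-sanidhya/AgentOS | packages/templates/src/code-review-agent/templates/langchain-python/tools/file_analyzer.py | _check_consistent_indentation
-- ===== SOURCE A (Python) =====
-- def _check_consistent_indentation(code_content: str, language: str) -> bool:
--     """Check for consistent indentation."""
--     lines = code_content.split('\n')
--     indents = []
--
--     for line in lines:
--         if line.strip():  # Non-empty line
--             indent = len(line) - len(line.lstrip())
--             if indent > 0:
--                 indents.append(indent)
--
--     if not indents:
--         return True
--
--     # Check if all indents are multiples of the smallest indent
--     min_indent = min(indents)
--     return all(indent % min_indent == 0 for indent in indents)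
-- ===== SOURCE B (Python) =====
-- def _gcd(a, b):
--     while b:
--         a, b = b, a % b
--     return a
--
--
-- def _check_consistent_indentation(code_content: str, language: str) -> bool:
--     """Single streaming pass: keep a running gcd and running minimum of the
--     positive indent widths; all are multiples of the minimum iff gcd == min
--     (both stay 0 when there are no indented lines, giving True)."""
--     g = 0
--     m = 0
--     for line in code_content.split('\n'):
--         if line.strip():
--             indent = len(line) - len(line.lstrip())
--             if indent > 0:
--                 g = _gcd(g, indent)
--                 if m == 0 or indent < m:
--                     m = indent
--     return g == m
-- ===== Notes on version B (the rewrite author's own statement) =====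
-- stated objective: alternative
-- what changed: Instead of building a list of indents, taking its min and re-scanning it for divisibility, B makes one streaming pass keeping a running gcd and running minimum and returns gcd == min (equal iff every indent is a multiple of the smallest).
import Mathlib
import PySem

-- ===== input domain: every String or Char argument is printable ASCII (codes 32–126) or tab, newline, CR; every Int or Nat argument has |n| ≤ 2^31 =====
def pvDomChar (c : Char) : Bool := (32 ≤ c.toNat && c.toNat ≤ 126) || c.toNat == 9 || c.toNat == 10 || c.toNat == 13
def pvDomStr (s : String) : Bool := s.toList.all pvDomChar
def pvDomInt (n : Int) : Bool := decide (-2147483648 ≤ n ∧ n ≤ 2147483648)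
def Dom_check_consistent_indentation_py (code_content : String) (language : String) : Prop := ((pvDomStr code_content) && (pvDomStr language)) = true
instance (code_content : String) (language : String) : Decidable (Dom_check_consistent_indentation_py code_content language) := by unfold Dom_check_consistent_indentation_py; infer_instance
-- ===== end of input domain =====

-- B replaces A's list-build / min / divisibility re-scan by one streaming pass keeping a running gcd and running minimum (alternative decomposition, same cost).

-- ===== PORT A =====
def check_consistent_indentation_py (code_content : String) (language : String) : Bool :=
  let lines := (PySem.Str.split? code_content "\n").getD []   -- sep "\n" ≠ "", so split? is always `some` here
  let indents := lines.foldl (fun acc line =>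
    if PySem.Str.strip line != "" then
      let indent := PySem.Str.len line - PySem.Str.len (PySem.Str.lstrip line)
      if indent > 0 then acc ++ [indent] else acc
    else acc) ([] : List Int)
  if indents.isEmpty then true
  else
    match PySem.List.min? indents (fun x => x) with
    | none => true  -- unreachable: indents nonempty
    | some min_indent => indents.all (fun indent => PySem.Int.mod indent min_indent == 0)

-- ===== PORT B =====
-- helper _gcd: while b: a, b = b, a % b  (Python %)
def pyGcd (a b : Int) : Int :=
  if h : b = 0 then a else pyGcd b (PySem.Int.mod a b)
termination_by b.natAbs
decreasing_by
  rcases lt_trichotomy b 0 with hb | hb | hb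
  · have := PySem.Int.mod_neg_bounds (a := a) hb; omega
  · exact absurd hb h
  · have h1 := PySem.Int.mod_nonneg (a := a) hb
    have h2 := PySem.Int.mod_lt (a := a) hb
    omega

def check_consistent_indentation_py_alt (code_content : String) (language : String) : Bool :=
  let p := ((PySem.Str.split? code_content "\n").getD []).foldl (fun (st : Int × Int) line =>
    if PySem.Str.strip line != "" then
      let indent := PySem.Str.len line - PySem.Str.len (PySem.Str.lstrip line)
      if indent > 0 then
        (pyGcd st.1 indent, if st.2 == 0 || indent < st.2 then indent else st.2)
      else st
    else st) ((0 : Int), (0 : Int))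
  p.1 == p.2

-- ===== PRECONDITION & SPEC =====
def Spec_check_consistent_indentation_py (code_content : String) (language : String) (out : Bool) : Prop := out = check_consistent_indentation_py_alt code_content language
instance (code_content : String) (language : String) (out : Bool) : Decidable (Spec_check_consistent_indentation_py code_content language out) := by unfold Spec_check_consistent_indentation_py; infer_instance

-- ===== CLAIM (what is proved, stated in full; the proofs are below) =====
def Claim_equal_check_consistent_indentation_py : Prop := ∀ (code_content : String) (language : String), Dom_check_consistent_indentation_py code_content language → Spec_check_consistent_indentation_py code_content language (check_consistent_indentation_py code_content language)

-- ===== LEMMAS AND PROOFS =====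

-- the indent width of a line, and the guard both programs share
def pvInd (line : String) : Int := PySem.Str.len line - PySem.Str.len (PySem.Str.lstrip line)
def pvP (line : String) : Bool := (PySem.Str.strip line != "") && decide (0 < pvInd line)

-- B's per-indent state update
def pvStep (st : Int × Int) (i : Int) : Int × Int :=
  (pyGcd st.1 i, if st.2 == 0 || i < st.2 then i else st.2)

theorem pyGcd_eq_gcd : ∀ (n : Nat) (a b : Int), b.natAbs = n → 0 ≤ a → 0 ≤ b →
    pyGcd a b = (Int.gcd a b : Int) := by
  intro n
  induction n using Nat.strong_induction_on with
  | _ n ih =>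
    intro a b hn ha hb
    rw [pyGcd]
    by_cases h : b = 0
    · subst h
      simp [Int.gcd, Int.natAbs_of_nonneg ha]
    · simp only [h, dite_false]
      have hbpos : 0 < b := lt_of_le_of_ne hb (Ne.symm h)
      have hme : PySem.Int.mod a b = a % b := PySem.Int.mod_eq_emod_of_pos hbpos
      have h1 : 0 ≤ a % b := Int.emod_nonneg a h
      have h2 : a % b < b := Int.emod_lt_of_pos a hbpos
      rw [hme, ih (a % b).natAbs (by omega) b (a % b) rfl hb h1]
      rw [Int.gcd_comm b (a % b), Int.gcd_emod a b]

-- fold of pvStep splits into two independent folds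
theorem foldl_pvStep_split (L : List Int) (g m : Int) :
    L.foldl pvStep (g, m)
      = (L.foldl (fun g i => pyGcd g i) g,
         L.foldl (fun m i => if m == 0 || i < m then i else m) m) := by
  induction L generalizing g m with
  | nil => rfl
  | cons x t ih => simp [List.foldl_cons, pvStep, ih]

def pvGfold (L : List Int) (g : Int) : Int := L.foldl (fun g i => (Int.gcd g i : Int)) g

theorem gfold_eq_pyGcd (L : List Int) (hpos : ∀ i ∈ L, 0 < i) :
    ∀ g : Int, 0 ≤ g → L.foldl (fun g i => pyGcd g i) g = pvGfold L g := by
  induction L with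
  | nil => intro g _; rfl
  | cons x t ih =>
    intro g hg
    have hx : 0 < x := hpos x (List.mem_cons_self)
    simp only [List.foldl_cons, pvGfold]
    rw [pyGcd_eq_gcd x.natAbs g x rfl hg hx.le]
    exact ih (fun i hi => hpos i (List.mem_cons_of_mem _ hi)) _ (Int.natCast_nonneg _)

theorem gfold_dvd_init (L : List Int) : ∀ g : Int, pvGfold L g ∣ g := by
  induction L with
  | nil => intro g; exact dvd_refl g
  | cons x t ih =>
    intro g
    exact dvd_trans (ih ((Int.gcd g x : Int))) (Int.gcd_dvd_left g x)

theorem gfold_dvd_mem (L : List Int) : ∀ g i, i ∈ L → pvGfold L g ∣ i := by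
  induction L with
  | nil => intro g i hi; cases hi
  | cons x t ih =>
    intro g i hi
    have hcons : pvGfold (x :: t) g = pvGfold t ((Int.gcd g x : Int)) := rfl
    rcases List.mem_cons.mp hi with rfl | h
    · rw [hcons]
      exact dvd_trans (gfold_dvd_init t _) (Int.gcd_dvd_right g i)
    · rw [hcons]
      exact ih _ i h

theorem dvd_gfold (L : List Int) (d : Int) (hd : 0 ≤ d) :
    ∀ g, d ∣ g → (∀ i ∈ L, d ∣ i) → d ∣ pvGfold L g := by
  lift d to Nat using hd
  induction L with
  | nil => intro g hg _; exact hg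
  | cons x t ih =>
    intro g hg h
    have hcons : pvGfold (x :: t) g = pvGfold t ((Int.gcd g x : Int)) := rfl
    rw [hcons]
    refine ih _ ?_ (fun i hi => h i (List.mem_cons_of_mem _ hi))
    exact Int.natCast_dvd_natCast.mpr (Int.dvd_gcd hg (h x List.mem_cons_self))

theorem gfold_nonneg (L : List Int) : ∀ g, 0 ≤ g → 0 ≤ pvGfold L g := by
  induction L with
  | nil => intro g hg; exact hg
  | cons x t ih => intro g _; exact ih _ (Int.natCast_nonneg _)

theorem mfold_eq_min (t : List Int) (hpos : ∀ i ∈ t, 0 < i) :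
    ∀ m : Int, 0 < m →
      t.foldl (fun m i => if m == 0 || i < m then i else m) m = t.foldl min m := by
  induction t with
  | nil => intro m _; rfl
  | cons x s ih =>
    intro m hm
    have hx : 0 < x := hpos x List.mem_cons_self
    have hstep : (if m == 0 || x < m then x else m) = min m x := by
      have h0 : (m == 0) = false := by simp only [beq_eq_false_iff_ne]; omega
      simp only [h0, Bool.false_or, min_def, decide_eq_true_eq]
      split_ifs <;> omega
    simp only [List.foldl_cons, hstep]
    exact ih (fun i hi => hpos i (List.mem_cons_of_mem _ hi)) _ (lt_min hm hx)

-- the list-level core: A's "every indent is a multiple of the min" equals B's "gcd = min"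
theorem pvCore (L : List Int) (hpos : ∀ i ∈ L, 0 < i) :
    (if L.isEmpty then true
     else match PySem.List.min? L (fun x => x) with
          | none => true
          | some m => L.all (fun i => PySem.Int.mod i m == 0))
    = ((L.foldl pvStep ((0:Int),(0:Int))).1 == (L.foldl pvStep ((0:Int),(0:Int))).2) := by
  cases L with
  | nil => rfl
  | cons x t =>
    have hx : 0 < x := hpos x List.mem_cons_self
    have ht : ∀ i ∈ t, 0 < i := fun i hi => hpos i (List.mem_cons_of_mem _ hi)
    set M : Int := t.foldl min x with hM
    have hmin : PySem.List.min? (x :: t) (fun y => y) = some M := PySem.List.min?_id_cons x t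
    have hMmem : M ∈ x :: t := PySem.List.min?_mem hmin
    have hMpos : 0 < M := hpos M hMmem
    have hMle : ∀ y ∈ x :: t, M ≤ y := PySem.List.min?_isMin hmin
    rw [foldl_pvStep_split]
    simp only [List.isEmpty_cons, Bool.false_eq_true, if_false, hmin]
    -- min component
    have hmcomp : (x :: t).foldl (fun m i => if m == 0 || i < m then i else m) (0:Int) = M := by
      simp only [List.foldl_cons]
      have h0 : (if (0:Int) == 0 || x < 0 then x else 0) = x := by simp
      rw [h0, mfold_eq_min t ht x hx]
    -- gcd component
    have hgcomp : (x :: t).foldl (fun g i => pyGcd g i) (0:Int) = pvGfold (x :: t) 0 :=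
      gfold_eq_pyGcd (x :: t) hpos 0 le_rfl
    rw [hmcomp, hgcomp]
    rw [Bool.eq_iff_iff]
    simp only [List.all_eq_true, beq_iff_eq, PySem.Int.mod_eq_zero_iff_dvd]
    constructor
    · intro h
      refine Int.dvd_antisymm (gfold_nonneg _ 0 le_rfl) hMpos.le ?_ ?_
      · exact gfold_dvd_mem (x :: t) 0 M hMmem
      · exact dvd_gfold (x :: t) M hMpos.le 0 (dvd_zero M) h
    · intro h i hi
      rw [← h]
      exact gfold_dvd_mem (x :: t) 0 i hi

-- ===== VERDICT (by name: the statement is the Claim_ definition above) =====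
theorem check_consistent_indentation_py_spec : Claim_equal_check_consistent_indentation_py := by
  intro code_content language _
  unfold Spec_check_consistent_indentation_py check_consistent_indentation_py check_consistent_indentation_py_alt
  set lines := (PySem.Str.split? code_content "\n").getD [] with hlines
  -- rewrite A's collecting fold into filter+map form
  have hA : lines.foldl (fun acc line =>
      if PySem.Str.strip line != "" then
        let indent := PySem.Str.len line - PySem.Str.len (PySem.Str.lstrip line)
        if indent > 0 then acc ++ [indent] else acc
      else acc) ([] : List Int)
      = (lines.filter pvP).map pvInd := by
    have hstep : (fun (acc : List Int) line =>
        if PySem.Str.strip line != "" then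
          let indent := PySem.Str.len line - PySem.Str.len (PySem.Str.lstrip line)
          if indent > 0 then acc ++ [indent] else acc
        else acc)
        = fun acc line => if pvP line then acc ++ [pvInd line] else acc := by
      funext acc line
      simp only [pvP, pvInd, Bool.and_eq_true, decide_eq_true_eq]
      split_ifs <;> simp_all <;> omega
    rw [hstep]
    simpa using PySem.List.foldl_append_if pvP pvInd lines []
  -- rewrite B's fold into a fold of pvStep over the same list
  have hB : lines.foldl (fun (st : Int × Int) line =>
      if PySem.Str.strip line != "" then
        let indent := PySem.Str.len line - PySem.Str.len (PySem.Str.lstrip line)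
        if indent > 0 then
          (pyGcd st.1 indent, if st.2 == 0 || indent < st.2 then indent else st.2)
        else st
      else st) ((0 : Int), (0 : Int))
      = ((lines.filter pvP).map pvInd).foldl pvStep ((0 : Int), (0 : Int)) := by
    have hstep : (fun (st : Int × Int) line =>
        if PySem.Str.strip line != "" then
          let indent := PySem.Str.len line - PySem.Str.len (PySem.Str.lstrip line)
          if indent > 0 then
            (pyGcd st.1 indent, if st.2 == 0 || indent < st.2 then indent else st.2)
          else st
        else st)
        = fun st line => if pvP line then pvStep st (pvInd line) else st := by
      funext st line
      simp only [pvP, pvInd, pvStep, Bool.and_eq_true, decide_eq_true_eq]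
      split_ifs <;> simp_all <;> omega
    rw [hstep, List.foldl_map, List.foldl_filter]
  have hpos : ∀ i ∈ (lines.filter pvP).map pvInd, 0 < i := by
    intro i hi
    rcases List.mem_map.mp hi with ⟨line, hline, rfl⟩
    have := (List.mem_filter.mp hline).2
    simp only [pvP, Bool.and_eq_true, decide_eq_true_eq] at this
    exact this.2
  simp only [hA, hB]
  exact pvCore ((lines.filter pvP).map pvInd) hpos
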